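-- pv_equiv track=rewrite | github.com/Th0rgal/dumbcontracts | scripts/check_axiom_report.py | classify_axioms
-- ===== SOURCE A (Python) =====
-- LEAN_BUILTIN_AXIOMS = frozenset([
--     "propext",
--     "Quot.sound",
--     "Classical.choice",
-- ])
--
-- DOCUMENTED_AXIOMS = frozenset([
--     "keccak256_first_4_bytes",
-- ])
--
-- FORBIDDEN_AXIOMS = frozenset([
--     "sorryAx",  # Indicates a sorry-based proof
-- ])
--
-- def classify_axioms(
--     axiom_map: dict[str, list[str]],
-- ) -> tuple[set[str], set[str], set[str], dict[str, list[str]]]: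
--     """Classify axioms into builtin, documented, forbidden, and unexpected."""
--     all_axioms: set[str] = set()
--     for axioms in axiom_map.values():
--         all_axioms.update(axioms)
--
--     builtin = all_axioms & LEAN_BUILTIN_AXIOMS
--     documented = all_axioms & DOCUMENTED_AXIOMS
--     forbidden = all_axioms & FORBIDDEN_AXIOMS
--     unexpected = all_axioms - LEAN_BUILTIN_AXIOMS - DOCUMENTED_AXIOMS
--
--     # Map unexpected axioms to the theorems that use them
--     unexpected_usage: dict[str, list[str]] = {}
--     for ax in unexpected:
--         users = [thm for thm, axioms in axiom_map.items() if ax in axioms]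
--         unexpected_usage[ax] = users
--
--     return builtin, documented, forbidden, unexpected_usage
-- ===== SOURCE B (Python) =====
-- LEAN_BUILTIN_AXIOMS = frozenset([
--     "propext",
--     "Quot.sound",
--     "Classical.choice",
-- ])
--
-- DOCUMENTED_AXIOMS = frozenset([
--     "keccak256_first_4_bytes",
-- ])
--
-- FORBIDDEN_AXIOMS = frozenset([
--     "sorryAx",
-- ])
--
-- def classify_axioms(
--     axiom_map: dict[str, list[str]],
-- ) -> tuple[set[str], set[str], set[str], dict[str, list[str]]]:
--     """Classify axioms into builtin, documented, forbidden, and unexpected.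
--
--     Single pass over axiom_map building an axiom -> using-theorems index,
--     then the four results are read off the index (no rescans of axiom_map).
--     """
--     users_of: dict[str, list[str]] = {}
--     for thm, axioms in axiom_map.items():
--         for ax in dict.fromkeys(axioms):
--             users_of.setdefault(ax, []).append(thm)
--     builtin = {ax for ax in users_of if ax in LEAN_BUILTIN_AXIOMS}
--     documented = {ax for ax in users_of if ax in DOCUMENTED_AXIOMS}
--     forbidden = {ax for ax in users_of if ax in FORBIDDEN_AXIOMS}
--     unexpected_usage = {ax: users for ax, users in users_of.items()
--                         if ax not in LEAN_BUILTIN_AXIOMS and ax not in DOCUMENTED_AXIOMS}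
--     return builtin, documented, forbidden, unexpected_usage
-- ===== Notes on version B (the rewrite author's own statement) =====
-- stated objective: faster
-- what changed: Instead of collecting all axioms into a set and then rescanning the whole axiom_map once per unexpected axiom, B makes a single pass over axiom_map building an axiom->using-theorems index and reads all four results off that index.
import Mathlib
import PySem

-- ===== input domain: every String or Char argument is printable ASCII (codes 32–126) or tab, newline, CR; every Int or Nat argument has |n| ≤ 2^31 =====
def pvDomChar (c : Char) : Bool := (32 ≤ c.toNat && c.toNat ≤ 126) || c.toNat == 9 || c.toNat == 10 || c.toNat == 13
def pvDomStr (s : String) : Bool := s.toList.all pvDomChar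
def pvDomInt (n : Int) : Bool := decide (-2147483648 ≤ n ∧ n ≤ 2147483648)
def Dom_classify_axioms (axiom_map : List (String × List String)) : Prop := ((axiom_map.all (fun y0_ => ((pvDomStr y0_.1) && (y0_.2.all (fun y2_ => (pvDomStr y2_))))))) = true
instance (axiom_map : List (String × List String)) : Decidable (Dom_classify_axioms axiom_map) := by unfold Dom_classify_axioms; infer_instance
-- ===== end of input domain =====

-- B replaces A's per-unexpected-axiom rescan of axiom_map (O(U*T*A)) by one pass building an
-- axiom -> using-theorems index (O(T*A)); objective: faster. The Python sets/dicts returned are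
-- order-insensitive values, both ports list them in first-insertion order.

-- ===== PORT A =====
def pvBuiltinAxioms : List String := ["propext", "Quot.sound", "Classical.choice"]
def pvDocumentedAxioms : List String := ["keccak256_first_4_bytes"]
def pvForbiddenAxioms : List String := ["sorryAx"]

def classify_axioms (axiom_map : List (String × List String)) : List String × List String × List String × (List (String × List String)) :=
  -- all_axioms = set(); for axioms in axiom_map.values(): all_axioms.update(axioms)
  let all_axioms : PySem.Set String :=
    axiom_map.foldl (fun s p => PySem.Set.update s p.2) PySem.Set.empty
  let builtin := PySem.Set.inter all_axioms pvBuiltinAxioms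
  let documented := PySem.Set.inter all_axioms pvDocumentedAxioms
  let forbidden := PySem.Set.inter all_axioms pvForbiddenAxioms
  let unexpected := PySem.Set.diff (PySem.Set.diff all_axioms pvBuiltinAxioms) pvDocumentedAxioms
  -- for ax in unexpected: users = [thm for thm, axioms in axiom_map.items() if ax in axioms]
  let unexpected_usage := unexpected.map
    (fun ax => (ax, (axiom_map.filter (fun p => p.2.contains ax)).map (fun p => p.1)))
  (builtin, documented, forbidden, unexpected_usage)

-- ===== PORT B =====
def classify_axioms_alt (axiom_map : List (String × List String)) : List String × List String × List String × (List (String × List String)) :=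
  -- for thm, axioms in axiom_map.items(): for ax in dict.fromkeys(axioms): users_of.setdefault(ax, []).append(thm)
  let users_of : PySem.Dict String (List String) :=
    axiom_map.foldl
      (fun d p => (PySem.List.dedup p.2).foldl
        (fun d ax => d.modify ax [] (fun us => us ++ [p.1])) d)
      PySem.Dict.empty
  let builtin := users_of.keys.filter (fun ax => pvBuiltinAxioms.contains ax)
  let documented := users_of.keys.filter (fun ax => pvDocumentedAxioms.contains ax)
  let forbidden := users_of.keys.filter (fun ax => pvForbiddenAxioms.contains ax)
  let unexpected_usage := users_of.items.filter
    (fun q => !pvBuiltinAxioms.contains q.1 && !pvDocumentedAxioms.contains q.1)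
  (builtin, documented, forbidden, unexpected_usage)

-- ===== PRECONDITION & SPEC =====
def Spec_classify_axioms (axiom_map : List (String × List String)) (out : List String × List String × List String × (List (String × List String))) : Prop := out = classify_axioms_alt axiom_map
instance (axiom_map : List (String × List String)) (out : List String × List String × List String × (List (String × List String))) : Decidable (Spec_classify_axioms axiom_map out) := by unfold Spec_classify_axioms; infer_instance

-- ===== CLAIM (what is proved, stated in full; the proofs are below) =====
def Claim_equal_classify_axioms : Prop := ∀ (axiom_map : List (String × List String)), Dom_classify_axioms axiom_map → Spec_classify_axioms axiom_map (classify_axioms axiom_map)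

-- ===== LEMMAS AND PROOFS =====

-- abbreviations for proof statements (A's set of all axioms, A's user list, B's index)
def pvAllAx (m : List (String × List String)) : PySem.Set String :=
  m.foldl (fun s p => PySem.Set.update s p.2) PySem.Set.empty

def pvUsersA (m : List (String × List String)) (ax : String) : List String :=
  (m.filter (fun p => p.2.contains ax)).map (fun p => p.1)

def pvIdx (m : List (String × List String)) : PySem.Dict String (List String) :=
  m.foldl
    (fun d p => (PySem.List.dedup p.2).foldl
      (fun d ax => d.modify ax [] (fun us => us ++ [p.1])) d)
    PySem.Dict.empty

-- the flattened (axiom, theorem) stream B's nested loop processes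
def pvPairs (m : List (String × List String)) : List (String × String) :=
  m.flatMap (fun p => (PySem.List.dedup p.2).map (fun ax => (ax, p.1)))

lemma pvIdx_eq_flat_gen (m : List (String × List String)) :
    ∀ d : PySem.Dict String (List String),
      m.foldl
        (fun d p => (PySem.List.dedup p.2).foldl
          (fun d ax => d.modify ax [] (fun us => us ++ [p.1])) d) d
      = (pvPairs m).foldl (fun d q => d.modify q.1 [] (fun us => us ++ [q.2])) d := by
  induction m with
  | nil => intro d; rfl
  | cons p m ih =>
      intro d
      simp only [pvPairs, List.flatMap_cons, List.foldl_cons, List.foldl_append, List.foldl_map]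
      exact ih _

lemma pvIdx_eq_flat (m : List (String × List String)) :
    pvIdx m = (pvPairs m).foldl (fun d q => d.modify q.1 [] (fun us => us ++ [q.2])) PySem.Dict.empty :=
  pvIdx_eq_flat_gen m _

lemma pvUpdate_dedup {s : PySem.Set String} {xs : List String} :
    PySem.Set.update s (PySem.List.dedup xs) = PySem.Set.update s xs := by
  rw [PySem.Set.update_eq_append_filter, PySem.Set.update_eq_append_filter,
      PySem.List.dedup_eq_ofList, PySem.Set.ofList_ofList]

lemma pvOfList_flat_dedup (m : List (String × List String)) :
    ∀ s : PySem.Set String,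
      PySem.Set.update s (m.flatMap (fun p => PySem.List.dedup p.2))
      = m.foldl (fun s p => PySem.Set.update s p.2) s := by
  induction m with
  | nil => intro s; rfl
  | cons p m ih =>
      intro s
      simp only [List.flatMap_cons, PySem.Set.update_append, List.foldl_cons, pvUpdate_dedup]
      exact ih _

lemma pvKeys_idx (m : List (String × List String)) : (pvIdx m).keys = pvAllAx m := by
  rw [pvIdx_eq_flat,
      PySem.Dict.keys_foldl_modify_key (pvPairs m) Prod.fst [] (fun _ q us => us ++ [q.2])]
  have hmap : (pvPairs m).map Prod.fst = m.flatMap (fun p => PySem.List.dedup p.2) := by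
    simp [pvPairs, List.map_flatMap, Function.comp_def]
  simp only [PySem.Dict.keys_empty, hmap]
  exact pvOfList_flat_dedup m []

lemma pvNodup_keys_idx (m : List (String × List String)) : (pvIdx m).keys.Nodup := by
  rw [pvIdx_eq_flat]
  exact PySem.Dict.nodup_keys_foldl_modify_key (pvPairs m) Prod.fst [] (fun _ q us => us ++ [q.2])
    PySem.Dict.empty PySem.Dict.nodup_keys_empty

lemma pvFilter_beq_nodup {l : List String} {c : String} (h : l.Nodup) :
    l.filter (fun ax => ax == c) = if l.contains c then [c] else [] := by
  induction l with
  | nil => simp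
  | cons a l ih =>
      rcases List.nodup_cons.mp h with ⟨ha, hl⟩
      by_cases hac : a = c
      · subst hac
        have : l.filter (fun ax => ax == a) = [] := by
          rw [List.filter_eq_nil_iff]
          intro x hx
          simp only [beq_iff_eq]
          intro hxa; exact ha (hxa ▸ hx)
        simp [this]
      · have hcl : (a :: l).contains c = l.contains c := by
          simp [Ne.symm hac]
        rw [List.filter_cons, if_neg (by simp [hac]), hcl, ih hl]

lemma pvGetD_idx (m : List (String × List String)) (c : String) :
    (pvIdx m).getD c [] = pvUsersA m c := by
  rw [pvIdx_eq_flat, PySem.Dict.getD_foldl_modify_append]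
  simp only [PySem.Dict.getD_empty, List.nil_append]
  induction m with
  | nil => rfl
  | cons p m ih =>
      have hstep : pvPairs (p :: m)
          = (PySem.List.dedup p.2).map (fun ax => (ax, p.1)) ++ pvPairs m := by
        simp only [pvPairs, List.flatMap_cons]
      rw [hstep, List.filter_append, List.map_append, ih, List.filter_map]
      have hcomp : ((fun q : String × String => q.1 == c) ∘ (fun ax => (ax, p.1)))
          = fun ax => ax == c := rfl
      rw [hcomp, pvFilter_beq_nodup (PySem.List.nodup_dedup p.2)]
      have hmem : (PySem.List.dedup p.2).contains c = p.2.contains c := by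
        simp
      rw [hmem]
      by_cases hm : c ∈ p.2
      · simp [pvUsersA, hm]
      · simp [pvUsersA, hm]

lemma pvItems_idx (m : List (String × List String)) :
    (pvIdx m).items = (pvAllAx m).map (fun ax => (ax, pvUsersA m ax)) := by
  rw [PySem.Dict.items_eq_map_keys (pvIdx m) (pvNodup_keys_idx m) [], pvKeys_idx]
  simp only [pvGetD_idx]

-- ===== VERDICT (by name: the statement is the Claim_ definition above) =====
theorem classify_axioms_spec : Claim_equal_classify_axioms := by
  intro m _
  unfold Spec_classify_axioms
  simp only [classify_axioms, classify_axioms_alt]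
  have hidx : m.foldl
      (fun d p => (PySem.List.dedup p.2).foldl
        (fun d ax => d.modify ax [] (fun us => us ++ [p.1])) d)
      PySem.Dict.empty = pvIdx m := rfl
  have hall : m.foldl (fun s p => PySem.Set.update s p.2) PySem.Set.empty = pvAllAx m := rfl
  rw [hidx, hall, pvKeys_idx, pvItems_idx]
  refine Prod.ext ?_ (Prod.ext ?_ (Prod.ext ?_ ?_))
  · simp [PySem.Set.inter]
  · simp [PySem.Set.inter]
  · simp [PySem.Set.inter]
  · show ((pvAllAx m).diff pvBuiltinAxioms |>.diff pvDocumentedAxioms).map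
        (fun ax => (ax, pvUsersA m ax))
      = ((pvAllAx m).map (fun ax => (ax, pvUsersA m ax))).filter
        (fun q => !pvBuiltinAxioms.contains q.1 && !pvDocumentedAxioms.contains q.1)
    rw [List.filter_map, PySem.Set.diff, PySem.Set.diff, List.filter_filter]
    refine congrArg (List.map _) (List.filter_congr ?_)
    intro x _
    simp [Bool.and_comm]
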